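-- pv_equiv track=rewrite | github.com/israelsz/ruuf-challenge | max_panels_2rectangle.py | initialize_two_rectangle_roof
-- ===== SOURCE A (Python) =====
-- def initialize_two_rectangle_roof(roofWidth, roofHeight, desplazamientoX, desplazamientoY):
--     # Calcular las dimensiones del array resultante
--     minRowIndex = min(0, desplazamientoY)
--     maxRowIndex = max(roofHeight, desplazamientoY + roofHeight)
--     minColIndex = min(0, desplazamientoX)
--     maxColIndex = max(roofWidth, desplazamientoX + roofWidth)
--
--     totalHeight = maxRowIndex - minRowIndex
--     totalWidth = maxColIndex - minColIndex
--
--     # Crear la matriz llenando todas las celdas como ocupadas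
--     roof = []
--     for _ in range(totalHeight):
--         row = []
--         for _ in range(totalWidth):
--             row.append(True)
--         roof.append(row)
--
--     # Offset para indexar correctamente en la matriz
--     # Asi se ajusta la posición dentro de la matriz resultante
--     offset_row = -minRowIndex
--     offset_col = -minColIndex
--
--     # Marcar el área del rectángulo A
--
--     for row in range(offset_row, offset_row + roofHeight):
--         for column in range(offset_col, offset_col + roofWidth):
--             roof[row][column] = False
--
--     # Marcar el área del rectángulo B
--
--     b_start_row = offset_row + desplazamientoY
--     b_start_col = offset_col + desplazamientoX
--
--     for row in range(b_start_row, b_start_row + roofHeight):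
--         for column in range(b_start_col, b_start_col + roofWidth):
--             roof[row][column] = False
--
--     return roof, totalHeight, totalWidth
-- ===== SOURCE B (Python) =====
-- def initialize_two_rectangle_roof(roofWidth, roofHeight, desplazamientoX, desplazamientoY):
--     # Single membership-predicate pass: a cell is True iff it lies in neither rectangle.
--     minRowIndex = min(0, desplazamientoY)
--     maxRowIndex = max(roofHeight, desplazamientoY + roofHeight)
--     minColIndex = min(0, desplazamientoX)
--     maxColIndex = max(roofWidth, desplazamientoX + roofWidth)
--     totalHeight = maxRowIndex - minRowIndex
--     totalWidth = maxColIndex - minColIndex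
--     offset_row = -minRowIndex
--     offset_col = -minColIndex
--     b_start_row = offset_row + desplazamientoY
--     b_start_col = offset_col + desplazamientoX
--     roof = [[not ((offset_row <= r < offset_row + roofHeight and offset_col <= c < offset_col + roofWidth)
--                   or (b_start_row <= r < b_start_row + roofHeight and b_start_col <= c < b_start_col + roofWidth))
--              for c in range(totalWidth)]
--             for r in range(totalHeight)]
--     return roof, totalHeight, totalWidth
-- ===== Notes on version B (the rewrite author's own statement) =====
-- stated objective: simpler
-- what changed: Replaced the all-True fill plus two region-overwrite double loops with a single comprehension pass that computes each cell directly from a rectangle-membership predicate.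
import Mathlib
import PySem

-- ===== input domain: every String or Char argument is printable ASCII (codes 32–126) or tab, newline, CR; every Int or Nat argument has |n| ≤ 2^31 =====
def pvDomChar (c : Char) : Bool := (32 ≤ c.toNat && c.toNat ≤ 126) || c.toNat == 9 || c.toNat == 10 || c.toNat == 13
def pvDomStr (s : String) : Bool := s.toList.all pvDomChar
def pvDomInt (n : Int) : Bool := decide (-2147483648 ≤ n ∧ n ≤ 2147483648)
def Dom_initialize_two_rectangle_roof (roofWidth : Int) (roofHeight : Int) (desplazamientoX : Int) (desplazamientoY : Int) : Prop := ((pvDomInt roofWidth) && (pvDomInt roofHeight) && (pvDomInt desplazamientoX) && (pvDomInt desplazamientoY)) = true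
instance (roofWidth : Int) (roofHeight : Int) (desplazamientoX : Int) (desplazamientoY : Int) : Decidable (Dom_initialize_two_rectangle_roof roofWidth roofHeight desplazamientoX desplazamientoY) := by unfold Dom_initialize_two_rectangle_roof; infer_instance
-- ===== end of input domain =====

-- B builds the grid in one comprehension pass from a rectangle-membership predicate instead of
-- filling True and overwriting the two rectangle regions; simpler, same O(H*W) cost.

-- ===== PORT A =====
def initialize_two_rectangle_roof (roofWidth : Int) (roofHeight : Int) (desplazamientoX : Int) (desplazamientoY : Int) : List (List Bool) × Int × Int :=
  let minRowIndex := min 0 desplazamientoY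
  let maxRowIndex := max roofHeight (desplazamientoY + roofHeight)
  let minColIndex := min 0 desplazamientoX
  let maxColIndex := max roofWidth (desplazamientoX + roofWidth)
  let totalHeight := maxRowIndex - minRowIndex
  let totalWidth := maxColIndex - minColIndex
  -- roof = [] ; for _ in range(totalHeight): row = [] ; for _ in range(totalWidth): row.append(True) ; roof.append(row)
  let roof : List (List Bool) :=
    (PySem.List.pyRange 0 totalHeight 1).foldl (fun roof _ =>
      roof ++ [(PySem.List.pyRange 0 totalWidth 1).foldl (fun row _ => row ++ [true]) []]) []
  let offset_row := -minRowIndex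
  let offset_col := -minColIndex
  -- rectangle A overwrite loop: roof[row][column] = False
  let roof :=
    (PySem.List.pyRange offset_row (offset_row + roofHeight) 1).foldl (fun roof row =>
      (PySem.List.pyRange offset_col (offset_col + roofWidth) 1).foldl (fun roof column =>
        PySem.List.pySetD roof row (PySem.List.pySetD (PySem.List.pyGetD roof row []) column false)) roof) roof
  let b_start_row := offset_row + desplazamientoY
  let b_start_col := offset_col + desplazamientoX
  -- rectangle B overwrite loop
  let roof :=
    (PySem.List.pyRange b_start_row (b_start_row + roofHeight) 1).foldl (fun roof row =>
      (PySem.List.pyRange b_start_col (b_start_col + roofWidth) 1).foldl (fun roof column =>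
        PySem.List.pySetD roof row (PySem.List.pySetD (PySem.List.pyGetD roof row []) column false)) roof) roof
  (roof, totalHeight, totalWidth)

-- ===== PORT B =====
def initialize_two_rectangle_roof_alt (roofWidth : Int) (roofHeight : Int) (desplazamientoX : Int) (desplazamientoY : Int) : List (List Bool) × Int × Int :=
  let minRowIndex := min 0 desplazamientoY
  let maxRowIndex := max roofHeight (desplazamientoY + roofHeight)
  let minColIndex := min 0 desplazamientoX
  let maxColIndex := max roofWidth (desplazamientoX + roofWidth)
  let totalHeight := maxRowIndex - minRowIndex
  let totalWidth := maxColIndex - minColIndex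
  let offset_row := -minRowIndex
  let offset_col := -minColIndex
  let b_start_row := offset_row + desplazamientoY
  let b_start_col := offset_col + desplazamientoX
  let roof : List (List Bool) :=
    (PySem.List.pyRange 0 totalHeight 1).map (fun r =>
      (PySem.List.pyRange 0 totalWidth 1).map (fun c =>
        !((decide (offset_row ≤ r) && decide (r < offset_row + roofHeight) &&
           decide (offset_col ≤ c) && decide (c < offset_col + roofWidth)) ||
          (decide (b_start_row ≤ r) && decide (r < b_start_row + roofHeight) &&
           decide (b_start_col ≤ c) && decide (c < b_start_col + roofWidth)))))
  (roof, totalHeight, totalWidth)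

-- ===== PRECONDITION & SPEC =====
def Spec_initialize_two_rectangle_roof (roofWidth : Int) (roofHeight : Int) (desplazamientoX : Int) (desplazamientoY : Int) (out : List (List Bool) × Int × Int) : Prop := out = initialize_two_rectangle_roof_alt roofWidth roofHeight desplazamientoX desplazamientoY
instance (roofWidth : Int) (roofHeight : Int) (desplazamientoX : Int) (desplazamientoY : Int) (out : List (List Bool) × Int × Int) : Decidable (Spec_initialize_two_rectangle_roof roofWidth roofHeight desplazamientoX desplazamientoY out) := by unfold Spec_initialize_two_rectangle_roof; infer_instance

-- ===== CLAIM (what is proved, stated in full; the proofs are below) =====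
def Claim_equal_initialize_two_rectangle_roof : Prop := ∀ (roofWidth : Int) (roofHeight : Int) (desplazamientoX : Int) (desplazamientoY : Int), Dom_initialize_two_rectangle_roof roofWidth roofHeight desplazamientoX desplazamientoY → Spec_initialize_two_rectangle_roof roofWidth roofHeight desplazamientoX desplazamientoY (initialize_two_rectangle_roof roofWidth roofHeight desplazamientoX desplazamientoY)

-- ===== LEMMAS AND PROOFS =====

-- appending a constant element once per loop iteration builds a replicate
theorem pv_foldl_append_const {α β : Type} (xs : List β) (v : α) :
    ∀ (init : List α), xs.foldl (fun l _ => l ++ [v]) init = init ++ List.replicate xs.length v := by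
  induction xs with
  | nil => intro init; simp
  | cons x xs ih =>
      intro init
      simp [List.foldl_cons, ih, List.replicate_succ, List.append_assoc]

-- congruence for maps over List.range
theorem pv_mapRange_congr {α : Type} (n : Nat) (f g : Nat → α)
    (h : ∀ i, i < n → f i = g i) : (List.range n).map f = (List.range n).map g := by
  apply List.map_congr_left
  intro i hi
  exact h i (List.mem_range.mp hi)

-- List.set on a map over range rewrites the function at one point
theorem pv_set_range_map {α : Type} (n k : Nat) (f : Nat → α) (v : α) (_hk : k < n) :
    ((List.range n).map f).set k v = (List.range n).map (fun i => if i = k then v else f i) := by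
  apply List.ext_getElem
  · simp
  · intro i h1 h2
    simp only [List.getElem_set, List.getElem_map, List.getElem_range]
    split_ifs <;> first | rfl | omega

theorem pv_getD_range_map {α : Type} (n k : Nat) (f : Nat → α) (d : α) (hk : k < n) :
    ((List.range n).map f).getD k d = f k := by
  simp [List.getD, hk]

-- the inner column loop on a row in range-map form
theorem pv_inner_fill (c : Int) (hc : 0 ≤ c) (W : Nat) :
    ∀ (m : Nat) (f : Nat → Bool),
    ((List.range m).map (fun (k : Nat) => c + (k : Int))).foldl
        (fun row cc => PySem.List.pySetD row cc false) ((List.range W).map f)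
      = (List.range W).map (fun (j : Nat) => if c ≤ (j : Int) ∧ (j : Int) < c + m then false else f j) := by
  intro m
  induction m with
  | zero =>
      intro f
      simp only [List.range_zero]
      apply pv_mapRange_congr
      intro j hj
      rw [if_neg (by omega)]
  | succ m ih =>
      intro f
      rw [List.range_succ, List.map_append, List.foldl_append, ih f]
      simp only [List.map_cons, List.map_nil, List.foldl_cons, List.foldl_nil]
      rw [PySem.List.pySetD_of_nonneg _ _ (by omega)]
      by_cases hW : (c + (m : Int)).toNat < W
      · rw [pv_set_range_map _ _ _ _ hW]
        apply pv_mapRange_congr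
        intro j hj
        have : ((c + (m : Int)).toNat : Int) = c + m := by omega
        split_ifs <;> first | rfl | omega
      · rw [List.set_eq_of_length_le (by simp; omega)]
        apply pv_mapRange_congr
        intro j hj
        split_ifs <;> first | rfl | omega

-- getD after set at the same in-range index
theorem pv_getD_set_self {α : Type} (l : List α) (n : Nat) (v : α) (d : α) (h : n < l.length) :
    (l.set n v).getD n d = v := by
  simp [List.getD, h]

-- the column loop over the whole grid equals one row update
theorem pv_inner_grid (r : Int) (hr : 0 ≤ r) :
    ∀ (cs : List Int), (∀ x ∈ cs, 0 ≤ x) → ∀ (G : List (List Bool)),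
    cs.foldl (fun G cc =>
        PySem.List.pySetD G r (PySem.List.pySetD (PySem.List.pyGetD G r []) cc false)) G
      = PySem.List.pySetD G r
          (cs.foldl (fun row cc => PySem.List.pySetD row cc false) (PySem.List.pyGetD G r [])) := by
  intro cs
  induction cs with
  | nil =>
      intro _ G
      simp only [List.foldl_nil]
      rw [PySem.List.pySetD_of_nonneg _ _ hr, PySem.List.pyGetD_of_nonneg _ _ hr]
      by_cases h : r.toNat < G.length
      · rw [List.getD_eq_getElem _ _ h, List.set_getElem_self]
      · rw [List.set_eq_of_length_le (by omega)]
  | cons c0 cs ih =>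
      intro hnn G
      have hc0 : 0 ≤ c0 := hnn c0 (by simp)
      simp only [List.foldl_cons]
      rw [ih (fun x hx => hnn x (by simp [hx]))]
      rw [PySem.List.pySetD_of_nonneg _ _ hr, PySem.List.pySetD_of_nonneg _ _ hr,
          PySem.List.pySetD_of_nonneg _ _ hr,
          PySem.List.pyGetD_of_nonneg _ _ hr, PySem.List.pyGetD_of_nonneg _ _ hr]
      by_cases h : r.toNat < G.length
      · rw [pv_getD_set_self _ _ _ _ (by simpa using h), List.set_set]
      · have hG : ∀ x : List Bool, G.set r.toNat x = G :=
          fun x => List.set_eq_of_length_le (by omega)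
        simp only [hG]

-- one grid cell: nested overwrite ifs versus the membership predicate
theorem pv_cell (PA PB : Prop) [Decidable PA] [Decidable PB]
    (bA bB : Bool) (hA : bA = true ↔ PA) (hB : bB = true ↔ PB) :
    (if PB then false else if PA then false else true) = !(bA || bB) := by
  by_cases h1 : PA <;> by_cases h2 : PB <;> simp_all

-- one rectangle overwrite loop on a grid in nested range-map form
theorem pv_outer_fill (a c d : Int) (ha : 0 ≤ a) (hc : 0 ≤ c) (H W : Nat) :
    ∀ (m : Nat) (g : Nat → Nat → Bool),
    ((List.range m).map (fun (k : Nat) => a + (k : Int))).foldl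
        (fun G row => (PySem.List.pyRange c d 1).foldl (fun G column =>
          PySem.List.pySetD G row
            (PySem.List.pySetD (PySem.List.pyGetD G row []) column false)) G)
        ((List.range H).map (fun i => (List.range W).map (g i)))
      = (List.range H).map (fun (i : Nat) => (List.range W).map (fun (j : Nat) =>
          if a ≤ (i : Int) ∧ (i : Int) < a + m ∧ c ≤ (j : Int) ∧ (j : Int) < d then false
          else g i j)) := by
  intro m
  induction m with
  | zero =>
      intro g
      simp only [List.range_zero]
      apply pv_mapRange_congr; intro i hi
      apply pv_mapRange_congr; intro j hj
      rw [if_neg (by omega)]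
  | succ m ih =>
      intro g
      rw [List.range_succ, List.map_append, List.foldl_append, ih g]
      simp only [List.map_cons, List.map_nil, List.foldl_cons, List.foldl_nil]
      rw [pv_inner_grid (a + m) (by omega) _
            (by intro x hx
                rw [PySem.List.mem_pyRange_one] at hx
                omega)]
      rw [PySem.List.pySetD_of_nonneg _ _ (by omega),
          PySem.List.pyGetD_of_nonneg _ _ (by omega)]
      rw [PySem.List.pyRange_one]
      by_cases hH : (a + (m : Int)).toNat < H
      · rw [pv_getD_range_map _ _ _ _ hH, pv_inner_fill c hc W ((d - c).toNat) _,
            pv_set_range_map _ _ _ _ hH]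
        apply pv_mapRange_congr; intro i hi
        have hcast : ((a + (m : Int)).toNat : Int) = a + m := by omega
        by_cases hieq : i = (a + (m : Int)).toNat
        · subst hieq
          rw [if_pos rfl]
          apply pv_mapRange_congr; intro j hj
          split_ifs <;> first | rfl | omega
        · rw [if_neg hieq]
          apply pv_mapRange_congr; intro j hj
          split_ifs <;> first | rfl | omega
      · have hlen : ((List.range H).map (fun (i : Nat) => (List.range W).map (fun (j : Nat) =>
            if a ≤ (i : Int) ∧ (i : Int) < a + m ∧ c ≤ (j : Int) ∧ (j : Int) < d then false
            else g i j))).getD (a + (m : Int)).toNat [] = [] := by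
          rw [List.getD_eq_getElem?_getD, List.getElem?_eq_none (by simp; omega)]
          rfl
        rw [hlen]
        have hempty := pv_inner_fill c hc 0 ((d - c).toNat) (fun _ => true)
        simp only [List.range_zero, List.map_nil] at hempty
        rw [hempty]
        rw [List.set_eq_of_length_le (by simp; omega)]
        apply pv_mapRange_congr; intro i hi
        apply pv_mapRange_congr; intro j hj
        split_ifs <;> first | rfl | omega

-- ===== VERDICT (by name: the statement is the Claim_ definition above) =====
theorem initialize_two_rectangle_roof_spec : Claim_equal_initialize_two_rectangle_roof := by
  intro w h dx dy _
  unfold Spec_initialize_two_rectangle_roof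
  unfold initialize_two_rectangle_roof initialize_two_rectangle_roof_alt
  simp only []
  set minRow := min 0 dy with hminRow
  set minCol := min 0 dx with hminCol
  set tH := max h (dy + h) - minRow with htH
  set tW := max w (dx + w) - minCol with htW
  have hor : (0 : Int) ≤ -minRow := by rw [hminRow]; omega
  have hoc : (0 : Int) ≤ -minCol := by rw [hminCol]; omega
  have hbr : (0 : Int) ≤ -minRow + dy := by rw [hminRow]; omega
  have hbc : (0 : Int) ≤ -minCol + dx := by rw [hminCol]; omega
  simp only [Prod.mk.injEq, and_true]
  -- initial all-True grid in nested range-map form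
  have hrow : (PySem.List.pyRange 0 tW 1).foldl (fun row _ => row ++ [true]) ([] : List Bool)
      = (List.range tW.toNat).map (fun _ => true) := by
    rw [pv_foldl_append_const, PySem.List.pyRange_one]
    simp [List.map_const']
  have hinit : (PySem.List.pyRange 0 tH 1).foldl (fun roof _ =>
        roof ++ [(PySem.List.pyRange 0 tW 1).foldl (fun row _ => row ++ [true]) []]) []
      = (List.range tH.toNat).map (fun _ => (List.range tW.toNat).map (fun _ => true)) := by
    rw [hrow, pv_foldl_append_const, PySem.List.pyRange_one]
    simp [List.map_const']
  simp only [hinit]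
  -- rectangle A fill
  rw [show PySem.List.pyRange (-minRow) (-minRow + h) 1
        = (List.range ((-minRow + h) - (-minRow)).toNat).map (fun (k : Nat) => -minRow + (k : Int))
      from PySem.List.pyRange_one _ _]
  rw [pv_outer_fill (-minRow) (-minCol) (-minCol + w) hor hoc tH.toNat tW.toNat _ _]
  -- rectangle B fill
  rw [show PySem.List.pyRange (-minRow + dy) (-minRow + dy + h) 1
        = (List.range ((-minRow + dy + h) - (-minRow + dy)).toNat).map
            (fun (k : Nat) => (-minRow + dy) + (k : Int))
      from PySem.List.pyRange_one _ _]
  rw [pv_outer_fill (-minRow + dy) (-minCol + dx) (-minCol + dx + w) hbr hbc tH.toNat tW.toNat _ _]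
  -- B side grid to nested range-map form
  rw [show PySem.List.pyRange 0 tH 1 = (List.range tH.toNat).map (fun (k : Nat) => (0 : Int) + k)
      by rw [PySem.List.pyRange_one]; norm_num]
  rw [show PySem.List.pyRange 0 tW 1 = (List.range tW.toNat).map (fun (k : Nat) => (0 : Int) + k)
      by rw [PySem.List.pyRange_one]; norm_num]
  rw [List.map_map]
  apply pv_mapRange_congr; intro i hi
  simp only [Function.comp]
  rw [List.map_map]
  apply pv_mapRange_congr; intro j hj
  simp only [Function.comp]
  simp only [zero_add]
  exact pv_cell _ _ _ _ (by simp; omega) (by simp; omega)
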